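-- pv_equiv track=rewrite | github.com/Aasthaengg/IBMdataset | Python_codes/p03496/s374393209.py | foo
-- ===== SOURCE A (Python) =====
-- def foo(xs, n):
--     largest = - 10**6
--     smallest = 10**6
--     largest_i = -1
--     smallest_i = -1
--     for i, x in enumerate(xs):
--         if largest < x:
--             largest = x
--             largest_i = i
--         if smallest > x:
--             smallest = x
--             smallest_i = i
--
--     ys = []
--     if smallest < 0 and abs(smallest) > largest:
--         for i in range(n-2, -1, -1):
--             while xs[i+1] < xs[i]:
--                 xs[i] += smallest
--                 ys.append((smallest_i, i))
--                 if xs[i] < smallest: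
--                     smallest_i = i
--                     smallest = xs[i]
--     else:
--         for i in range(1, n):
--             while xs[i-1] > xs[i]:
--                 xs[i] += largest
--                 ys.append((largest_i, i))
--                 if xs[i] > largest:
--                     largest_i = i
--                     largest = xs[i]
--     return ys
-- ===== SOURCE B (Python) =====
-- def foo(xs, n):
--     # NOTE: like the original, this mutates xs in place; the equivalence claim is about the return value.
--     ys = []
--     if not xs:
--         return ys
--     largest = max(xs)
--     largest_i = xs.index(largest)
--     smallest = min(xs)
--     smallest_i = xs.index(smallest)
--     if smallest < 0 and -smallest > largest:
--         for i in range(n - 2, -1, -1):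
--             d = xs[i] - xs[i + 1]
--             if d > 0:
--                 # k = ceil(d / -smallest); dodge the big-int division when k is 1 or 2
--                 k = 1 if d <= -smallest else (2 if d <= -2 * smallest else -(d // smallest))
--                 xs[i] += k * smallest
--                 ys.extend([(smallest_i, i)] * k)
--                 if xs[i] < smallest:
--                     smallest, smallest_i = xs[i], i
--     else:
--         for i in range(1, n):
--             d = xs[i - 1] - xs[i]
--             if d > 0:
--                 # k = ceil(d / largest); dodge the big-int division when k is 1 or 2
--                 k = 1 if d <= largest else (2 if d <= 2 * largest else -(-d // largest))
--                 xs[i] += k * largest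
--                 ys.extend([(largest_i, i)] * k)
--                 if xs[i] > largest:
--                     largest, largest_i = xs[i], i
--     return ys
-- ===== Notes on version B (the rewrite author's own statement) =====
-- stated objective: alternative
-- what changed: B replaces A's one-step-at-a-time inner while loops by a closed-form ceiling-division count k (with the division dodged when k is 1 or 2) applied as one batched list extension ys.extend([pair]*k) and a single write xs[i] += k*step, and finds the extrema and their first indices with the builtins max/min/list.index instead of A's hand-rolled sentinel scan.
import Mathlib
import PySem

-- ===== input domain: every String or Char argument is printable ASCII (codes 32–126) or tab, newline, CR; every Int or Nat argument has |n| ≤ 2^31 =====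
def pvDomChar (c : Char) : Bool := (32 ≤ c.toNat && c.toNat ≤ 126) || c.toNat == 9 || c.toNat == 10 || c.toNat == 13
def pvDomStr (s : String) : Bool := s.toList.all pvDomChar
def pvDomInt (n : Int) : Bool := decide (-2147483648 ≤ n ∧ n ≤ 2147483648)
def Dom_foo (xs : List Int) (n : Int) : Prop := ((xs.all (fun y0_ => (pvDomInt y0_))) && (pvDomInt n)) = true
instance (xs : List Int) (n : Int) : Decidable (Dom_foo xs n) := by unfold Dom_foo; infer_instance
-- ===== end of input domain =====

-- B replaces A's one-step-at-a-time inner while loops by a closed-form count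
-- (ceiling division) with a single batched list extension, and finds max/min with
-- the builtins; same return value (and same final mutation of xs in the Python).
-- Both Pythons mutate xs in place; the equivalence proved here is about the return value.

-- ===== PORT A =====
-- Port notes: all indices produced by range() below are ≥ 0 and, under Pre_foo, in
-- range, so xs[j] / xs[j]=v are ported with PySem.List.pyGetD / pySetD (exact there).
-- The Python `while` loops are ported with fuel (the initial gap |xs[i±1]-xs[i]|),
-- which bounds the number of iterations on every input admitted by Pre_foo.

def fooScanStep (s : Int × Int × Int × Int) (p : Int × Int) : Int × Int × Int × Int :=
  match s, p with
  | (L, Li, m, mi), (i, x) =>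
    let q1 := if L < x then (x, i) else (L, Li)
    let q2 := if m > x then (x, i) else (m, mi)
    (q1.1, q1.2, q2.1, q2.2)

def fooWhileMax (fuel : Nat) (t x L Li i : Int) (ys : List (Int × Int)) :
    Int × Int × Int × List (Int × Int) :=
  match fuel with
  | 0 => (x, L, Li, ys)
  | f + 1 =>
    if t > x then
      let x' := x + L
      let ys' := ys ++ [(Li, i)]
      if x' > L then fooWhileMax f t x' x' i i ys'
      else fooWhileMax f t x' L Li i ys'
    else (x, L, Li, ys)

def fooWhileMin (fuel : Nat) (t x m mi i : Int) (ys : List (Int × Int)) :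
    Int × Int × Int × List (Int × Int) :=
  match fuel with
  | 0 => (x, m, mi, ys)
  | f + 1 =>
    if t < x then
      let x' := x + m
      let ys' := ys ++ [(mi, i)]
      if x' < m then fooWhileMin f t x' x' i i ys'
      else fooWhileMin f t x' m mi i ys'
    else (x, m, mi, ys)

def fooMaxStep (s : List Int × Int × Int × List (Int × Int)) (i : Int) :
    List Int × Int × Int × List (Int × Int) :=
  match s with
  | (xs, L, Li, ys) =>
    let t := PySem.List.pyGetD xs (i - 1) 0
    let x := PySem.List.pyGetD xs i 0
    match fooWhileMax (t - x).toNat t x L Li i ys with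
    | (x', L', Li', ys') => (PySem.List.pySetD xs i x', L', Li', ys')

def fooMinStep (s : List Int × Int × Int × List (Int × Int)) (i : Int) :
    List Int × Int × Int × List (Int × Int) :=
  match s with
  | (xs, m, mi, ys) =>
    let t := PySem.List.pyGetD xs (i + 1) 0
    let x := PySem.List.pyGetD xs i 0
    match fooWhileMin (x - t).toNat t x m mi i ys with
    | (x', m', mi', ys') => (PySem.List.pySetD xs i x', m', mi', ys')

def foo (xs : List Int) (n : Int) : List (Int × Int) :=
  let s := (PySem.List.enumerate xs).foldl fooScanStep (-1000000, -1, 1000000, -1)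
  if s.2.2.1 < 0 ∧ |s.2.2.1| > s.1 then
    ((PySem.List.pyRange (n - 2) (-1) (-1)).foldl fooMinStep (xs, s.2.2.1, s.2.2.2, [])).2.2.2
  else
    ((PySem.List.pyRange 1 n 1).foldl fooMaxStep (xs, s.1, s.2.1, [])).2.2.2

-- ===== PORT B =====
def fooAltMaxStep (s : List Int × Int × Int × List (Int × Int)) (i : Int) :
    List Int × Int × Int × List (Int × Int) :=
  match s with
  | (xs, L, Li, ys) =>
    let d := PySem.List.pyGetD xs (i - 1) 0 - PySem.List.pyGetD xs i 0
    if d > 0 then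
      -- k = ceil(d / L), with the division dodged when k is 1 or 2 (as in Source B)
      let k := if d ≤ L then 1 else if d ≤ 2 * L then 2 else -(PySem.Int.floordiv (-d) L)
      let x := PySem.List.pyGetD xs i 0 + k * L
      let xs' := PySem.List.pySetD xs i x
      let ys' := ys ++ PySem.List.pyRepeat [(Li, i)] k
      if x > L then (xs', x, i, ys') else (xs', L, Li, ys')
    else s

def fooAltMinStep (s : List Int × Int × Int × List (Int × Int)) (i : Int) :
    List Int × Int × Int × List (Int × Int) :=
  match s with
  | (xs, m, mi, ys) =>
    let d := PySem.List.pyGetD xs i 0 - PySem.List.pyGetD xs (i + 1) 0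
    if d > 0 then
      -- k = ceil(d / -m), with the division dodged when k is 1 or 2 (as in Source B)
      let k := if d ≤ -m then 1 else if d ≤ -2 * m then 2 else -(PySem.Int.floordiv d m)
      let x := PySem.List.pyGetD xs i 0 + k * m
      let xs' := PySem.List.pySetD xs i x
      let ys' := ys ++ PySem.List.pyRepeat [(mi, i)] k
      if x < m then (xs', x, i, ys') else (xs', m, mi, ys')
    else s

def foo_alt (xs : List Int) (n : Int) : List (Int × Int) :=
  if xs = [] then [] else
  let L := (PySem.List.max? xs (fun y => y)).getD 0
  let Li : Int := ((PySem.List.index? xs L).getD 0 : Nat)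
  let m := (PySem.List.min? xs (fun y => y)).getD 0
  let mi : Int := ((PySem.List.index? xs m).getD 0 : Nat)
  if m < 0 ∧ -m > L then
    ((PySem.List.pyRange (n - 2) (-1) (-1)).foldl fooAltMinStep (xs, m, mi, [])).2.2.2
  else
    ((PySem.List.pyRange 1 n 1).foldl fooAltMaxStep (xs, L, Li, [])).2.2.2

-- ===== PRECONDITION & SPEC =====
-- Pre_foo excludes exactly the inputs on which the Python A raises IndexError:
-- 2 ≤ n together with n > len(xs) (then A reads xs[n-1] or walks past the end).
def Pre_foo (xs : List Int) (n : Int) : Prop := n ≤ (xs.length : Int) ∨ n ≤ 1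
instance (xs : List Int) (n : Int) : Decidable (Pre_foo xs n) := by unfold Pre_foo; infer_instance
def pvWitness_foo : List Int × Int := ([3, 1, 2], 3)

def Spec_foo (xs : List Int) (n : Int) (out : List (Int × Int)) : Prop := out = foo_alt xs n
instance (xs : List Int) (n : Int) (out : List (Int × Int)) : Decidable (Spec_foo xs n out) := by unfold Spec_foo; infer_instance

-- ===== CLAIM (what is proved, stated in full; the proofs are below) =====
def Claim_equal_foo : Prop := ∀ (xs : List Int) (n : Int), Dom_foo xs n → Pre_foo xs n → Spec_foo xs n (foo xs n)

-- ===== LEMMAS AND PROOFS =====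

def amax (L Li s : Int) : List Int → Int × Int
  | [] => (L, Li)
  | x :: t => if L < x then amax x s (s + 1) t else amax L Li (s + 1) t
def amin (m mi s : Int) : List Int → Int × Int
  | [] => (m, mi)
  | x :: t => if m > x then amin x s (s + 1) t else amin m mi (s + 1) t

theorem amax_cons (L Li s a : Int) (t : List Int) :
    amax L Li s (a :: t) = if L < a then amax a s (s + 1) t else amax L Li (s + 1) t := rfl

theorem amin_cons (m mi s a : Int) (t : List Int) :
    amin m mi s (a :: t) = if m > a then amin a s (s + 1) t else amin m mi (s + 1) t := rfl

theorem scan_eq_amax_amin (xs : List Int) : ∀ (s L Li m mi : Int),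
    (PySem.List.enumerate xs s).foldl fooScanStep (L, Li, m, mi)
      = ((amax L Li s xs).1, (amax L Li s xs).2, (amin m mi s xs).1, (amin m mi s xs).2) := by
  induction xs with
  | nil => intro s L Li m mi; simp [PySem.List.enumerate, amax, amin]
  | cons a t ih =>
    intro s L Li m mi
    rw [PySem.List.enumerate_cons]
    simp only [List.foldl_cons]
    by_cases h1 : L < a <;> by_cases h2 : m > a <;>
      simp [fooScanStep, h1, h2, amax, amin, ih]

theorem amax_fst (xs : List Int) : ∀ (L Li s : Int), (amax L Li s xs).1 = xs.foldl max L := by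
  induction xs with
  | nil => intro L Li s; simp [amax]
  | cons a t ih =>
    intro L Li s
    by_cases h : L < a
    · simp only [amax, if_pos h, List.foldl_cons, ih]
      rw [show max L a = a from by omega]
    · simp only [amax, if_neg h, List.foldl_cons, ih]
      rw [show max L a = L from by omega]

theorem amin_fst (xs : List Int) : ∀ (m mi s : Int), (amin m mi s xs).1 = xs.foldl min m := by
  induction xs with
  | nil => intro m mi s; simp [amin]
  | cons a t ih =>
    intro m mi s
    by_cases h : m > a
    · simp only [amin, if_pos h, List.foldl_cons, ih]
      rw [show min m a = a from by omega]
    · simp only [amin, if_neg h, List.foldl_cons, ih]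
      rw [show min m a = m from by omega]

theorem amax_of_le (xs : List Int) : ∀ (L Li s : Int), (∀ x ∈ xs, x ≤ L) →
    amax L Li s xs = (L, Li) := by
  induction xs with
  | nil => intro L Li s _; rfl
  | cons a t ih =>
    intro L Li s h
    have ha : ¬ L < a := by have := h a (by simp); omega
    simp only [amax, if_neg ha]
    exact ih L Li (s + 1) (fun x hx => h x (by simp [hx]))

theorem amin_of_ge (xs : List Int) : ∀ (m mi s : Int), (∀ x ∈ xs, m ≤ x) →
    amin m mi s xs = (m, mi) := by
  induction xs with
  | nil => intro m mi s _; rfl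
  | cons a t ih =>
    intro m mi s h
    have ha : ¬ m > a := by have := h a (by simp); omega
    simp only [amin, if_neg ha]
    exact ih m mi (s + 1) (fun x hx => h x (by simp [hx]))

theorem amax_snd : ∀ (xs : List Int) (M : Int),
    PySem.List.max? xs (fun y => y) = some M →
    ∀ (L Li s : Int), L < M →
      (amax L Li s xs).2 = s + ((PySem.List.index? xs M).getD 0 : Nat) := by
  intro xs
  induction xs with
  | nil => intro M hM; simp [PySem.List.max?] at hM
  | cons a t ih =>
    intro M hM L Li s hLM
    rw [PySem.List.max?_id_cons] at hM
    have hM' : M = t.foldl max a := by injection hM with h; omega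
    rcases em (∀ x ∈ t, x ≤ a) with hta | hta
    · -- head is the max
      have h1 := (PySem.List.le_foldl_max t a).1
      have hMa : M = a := by
        rcases PySem.List.foldl_max_mem t a with h | h
        · omega
        · have := hta _ h; omega
      have hLa : L < a := by omega
      rw [amax_cons, if_pos hLa]
      rw [amax_of_le t a s (s+1) (by intro x hx; exact hta x hx)]
      rw [hMa, PySem.List.index?_cons_self]
      simp
    · push_neg at hta
      obtain ⟨w, hw, haw⟩ := hta
      -- the max lives in the tail and exceeds a
      obtain ⟨b, u, rfl⟩ : ∃ b u, t = b :: u := by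
        cases t with
        | nil => simp at hw
        | cons b u => exact ⟨b, u, rfl⟩
      have hMt : PySem.List.max? (b :: u) (fun y => y) = some (u.foldl max b) :=
        PySem.List.max?_id_cons b u
      have hfact : (b :: u).foldl max a = max a (u.foldl max b) := by
        simp only [List.foldl_cons]
        exact List.foldl_assoc
      have hwle := (PySem.List.le_foldl_max (b :: u) a).2 w hw
      have haM : a < M := by omega
      have hMeq : M = u.foldl max b := by
        rw [hM', hfact] at haM ⊢; omega
      have hMmem : M ∈ (b :: u) := by
        rcases PySem.List.foldl_max_mem u b with h | h
        · simp [hMeq, h]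
        · simp [hMeq]; right; exact h
      obtain ⟨k, hk⟩ : ∃ k, PySem.List.index? (b :: u) M = some k :=
        Option.isSome_iff_exists.mp ((PySem.List.index?_isSome_iff _ _).mpr hMmem)
      have hne : a ≠ M := by omega
      have hcons : PySem.List.index? (a :: b :: u) M
          = Option.map (fun x => x + 1) (PySem.List.index? (b :: u) M) :=
        PySem.List.index?_cons_of_ne _ hne
      have hMt' : PySem.List.max? (b :: u) (fun y => y) = some M := by
        rw [← hMeq] at hMt; exact hMt
      by_cases hLa : L < a
      · rw [amax_cons, if_pos hLa]
        rw [ih M hMt' a s (s + 1) (by omega)]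
        rw [hcons, hk]
        simp; push_cast; ring
      · rw [amax_cons, if_neg hLa]
        rw [ih M hMt' L Li (s + 1) (by omega)]
        rw [hcons, hk]
        simp; push_cast; ring

theorem amin_snd : ∀ (xs : List Int) (m : Int),
    PySem.List.min? xs (fun y => y) = some m →
    ∀ (M0 mi s : Int), m < M0 →
      (amin M0 mi s xs).2 = s + ((PySem.List.index? xs m).getD 0 : Nat) := by
  intro xs
  induction xs with
  | nil => intro m hm; simp [PySem.List.min?] at hm
  | cons a t ih =>
    intro m hm M0 mi s hmM
    rw [PySem.List.min?_id_cons] at hm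
    have hm' : m = t.foldl min a := by injection hm with h; omega
    rcases em (∀ x ∈ t, a ≤ x) with hta | hta
    · have h1 := (PySem.List.foldl_min_le t a).1
      have hma : m = a := by
        rcases PySem.List.foldl_min_mem t a with h | h
        · omega
        · have := hta _ h; omega
      have hMa : M0 > a := by omega
      rw [amin_cons, if_pos hMa]
      rw [amin_of_ge t a s (s+1) (by intro x hx; exact hta x hx)]
      rw [hma, PySem.List.index?_cons_self]
      simp
    · push_neg at hta
      obtain ⟨w, hw, haw⟩ := hta
      obtain ⟨b, u, rfl⟩ : ∃ b u, t = b :: u := by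
        cases t with
        | nil => simp at hw
        | cons b u => exact ⟨b, u, rfl⟩
      have hmt : PySem.List.min? (b :: u) (fun y => y) = some (u.foldl min b) :=
        PySem.List.min?_id_cons b u
      have hfact : (b :: u).foldl min a = min a (u.foldl min b) := by
        simp only [List.foldl_cons]
        exact List.foldl_assoc
      have hwle := (PySem.List.foldl_min_le (b :: u) a).2 w hw
      have haM : m < a := by omega
      have hmeq : m = u.foldl min b := by
        rw [hm', hfact] at haM ⊢; omega
      have hmmem : m ∈ (b :: u) := by
        rcases PySem.List.foldl_min_mem u b with h | h
        · simp [hmeq, h]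
        · simp [hmeq]; right; exact h
      obtain ⟨k, hk⟩ : ∃ k, PySem.List.index? (b :: u) m = some k :=
        Option.isSome_iff_exists.mp ((PySem.List.index?_isSome_iff _ _).mpr hmmem)
      have hne : a ≠ m := by omega
      have hcons : PySem.List.index? (a :: b :: u) m
          = Option.map (fun x => x + 1) (PySem.List.index? (b :: u) m) :=
        PySem.List.index?_cons_of_ne _ hne
      have hmt' : PySem.List.min? (b :: u) (fun y => y) = some m := by
        rw [← hmeq] at hmt; exact hmt
      by_cases hMa : M0 > a
      · rw [amin_cons, if_pos hMa]
        rw [ih m hmt' a s (s + 1) (by omega)]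
        rw [hcons, hk]
        simp; push_cast; ring
      · rw [amin_cons, if_neg hMa]
        rw [ih m hmt' M0 mi (s + 1) (by omega)]
        rw [hcons, hk]
        simp; push_cast; ring

theorem whileMax_stop (fuel : Nat) (t x L Li i : Int) (ys : List (Int × Int)) (h : ¬ t > x) :
    fooWhileMax fuel t x L Li i ys = (x, L, Li, ys) := by
  cases fuel <;> simp [fooWhileMax, h]

theorem whileMax_char (q : Int) : ∀ (fuel : Nat) (t x L Li i : Int) (ys : List (Int × Int)),
    1 ≤ L → t ≤ L → x < t → 1 ≤ q → (q - 1) * L < t - x → t - x ≤ q * L → q ≤ (fuel : Int) →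
    fooWhileMax fuel t x L Li i ys =
      (x + q * L, (if x + q * L > L then x + q * L else L),
        (if x + q * L > L then i else Li), ys ++ List.replicate q.toNat (Li, i)) := by
  intro fuel
  induction fuel generalizing q with
  | zero => intro t x L Li i ys _ _ _ hq _ _ hf; simp at hf; omega
  | succ f ih =>
    intro t x L Li i ys hL hTL hx hq hlow hup hf
    have hguard : t > x := hx
    rw [show fooWhileMax (f + 1) t x L Li i ys =
        (if x + L > L then fooWhileMax f t (x + L) (x + L) i i (ys ++ [(Li, i)])
         else fooWhileMax f t (x + L) L Li i (ys ++ [(Li, i)])) from by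
      simp [fooWhileMax, hguard]]
    by_cases hq1 : q = 1
    · subst hq1
      have hstop : ¬ t > x + L := by omega
      have hrep : List.replicate (1 : Int).toNat (Li, i) = [(Li, i)] := rfl
      by_cases hXL : x + L > L
      · rw [if_pos hXL, whileMax_stop _ _ _ _ _ _ _ hstop]
        rw [hrep]
        simp only [one_mul]
        rw [if_pos hXL, if_pos hXL]
      · rw [if_neg hXL, whileMax_stop _ _ _ _ _ _ _ hstop]
        rw [hrep]
        simp only [one_mul]
        rw [if_neg hXL, if_neg hXL]
    · have hq2 : 2 ≤ q := by omega
      have hstep : L ≤ (q - 1) * L := by nlinarith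
      have hxL : x + L < t := by omega
      have hnup : ¬ x + L > L := by omega
      rw [if_neg hnup]
      rw [ih (q - 1) t (x + L) L Li i (ys ++ [(Li, i)]) hL hTL hxL (by omega)
        (by nlinarith) (by nlinarith) (by omega)]
      have harith : x + L + (q - 1) * L = x + q * L := by ring
      rw [harith]
      have hrep : (ys ++ [(Li, i)]) ++ List.replicate (q - 1).toNat (Li, i)
          = ys ++ List.replicate q.toNat (Li, i) := by
        rw [List.append_assoc]
        congr 1
        rw [show q.toNat = (q - 1).toNat + 1 from by omega]
        rw [List.replicate_succ]
        rfl
      rw [hrep]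

theorem whileMin_stop (fuel : Nat) (t x m mi i : Int) (ys : List (Int × Int)) (h : ¬ t < x) :
    fooWhileMin fuel t x m mi i ys = (x, m, mi, ys) := by
  cases fuel <;> simp [fooWhileMin, h]

theorem whileMin_char (q : Int) : ∀ (fuel : Nat) (t x m mi i : Int) (ys : List (Int × Int)),
    m ≤ -1 → m ≤ t → t < x → 1 ≤ q → (q - 1) * (-m) < x - t → x - t ≤ q * (-m) → q ≤ (fuel : Int) →
    fooWhileMin fuel t x m mi i ys =
      (x + q * m, (if x + q * m < m then x + q * m else m),
        (if x + q * m < m then i else mi), ys ++ List.replicate q.toNat (mi, i)) := by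
  intro fuel
  induction fuel generalizing q with
  | zero => intro t x m mi i ys _ _ _ hq _ _ hf; simp at hf; omega
  | succ f ih =>
    intro t x m mi i ys hm hmt hx hq hlow hup hf
    have hguard : t < x := hx
    rw [show fooWhileMin (f + 1) t x m mi i ys =
        (if x + m < m then fooWhileMin f t (x + m) (x + m) i i (ys ++ [(mi, i)])
         else fooWhileMin f t (x + m) m mi i (ys ++ [(mi, i)])) from by
      simp [fooWhileMin, hguard]]
    by_cases hq1 : q = 1
    · subst hq1
      have hstop : ¬ t < x + m := by omega
      have hrep : List.replicate (1 : Int).toNat (mi, i) = [(mi, i)] := rfl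
      by_cases hXm : x + m < m
      · rw [if_pos hXm, whileMin_stop _ _ _ _ _ _ _ hstop]
        rw [hrep]
        simp only [one_mul]
        rw [if_pos hXm, if_pos hXm]
      · rw [if_neg hXm, whileMin_stop _ _ _ _ _ _ _ hstop]
        rw [hrep]
        simp only [one_mul]
        rw [if_neg hXm, if_neg hXm]
    · have hq2 : 2 ≤ q := by omega
      have hstep : -m ≤ (q - 1) * (-m) := by nlinarith
      have hxm : t < x + m := by omega
      have hnup : ¬ x + m < m := by omega
      rw [if_neg hnup]
      rw [ih (q - 1) t (x + m) m mi i (ys ++ [(mi, i)]) hm hmt hxm (by omega)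
        (by nlinarith) (by nlinarith) (by omega)]
      have harith : x + m + (q - 1) * m = x + q * m := by ring
      rw [harith]
      have hrep : (ys ++ [(mi, i)]) ++ List.replicate (q - 1).toNat (mi, i)
          = ys ++ List.replicate q.toNat (mi, i) := by
        rw [List.append_assoc]
        congr 1
        rw [show q.toNat = (q - 1).toNat + 1 from by omega]
        rw [List.replicate_succ]
        rfl
      rw [hrep]

theorem pySetD_eq_set (xs : List Int) (i v : Int) (h0 : 0 ≤ i) (h1 : i < (xs.length : Int)) :
    PySem.List.pySetD xs i v = xs.set i.toNat v := by
  simp [PySem.List.pySetD, PySem.List.pySet?, PySem.List.pyIdx?, h0, h1]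

theorem maxStep_both (xs : List Int) (L Li : Int) (ys : List (Int × Int)) (i : Int)
    (h1 : 1 ≤ i) (h2 : i < (xs.length : Int))
    (hub : ∀ v ∈ xs, v ≤ L) (hz : 1 ≤ L ∨ ∀ v ∈ xs, v = 0) :
    fooAltMaxStep (xs, L, Li, ys) i = fooMaxStep (xs, L, Li, ys) i ∧
    ((fooMaxStep (xs, L, Li, ys) i).1.length = xs.length ∧
     (∀ v ∈ (fooMaxStep (xs, L, Li, ys) i).1, v ≤ (fooMaxStep (xs, L, Li, ys) i).2.1) ∧
     (1 ≤ (fooMaxStep (xs, L, Li, ys) i).2.1 ∨ ∀ v ∈ (fooMaxStep (xs, L, Li, ys) i).1, v = 0)) := by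
  have hlen0 : (0 : Int) ≤ xs.length := by positivity
  set t := PySem.List.pyGetD xs (i - 1) 0 with ht
  set x := PySem.List.pyGetD xs i 0 with hx
  have htmem : t ∈ xs := PySem.List.pyGetD_mem xs 0 ⟨by omega, by omega⟩
  have hxmem : x ∈ xs := PySem.List.pyGetD_mem xs 0 ⟨by omega, by omega⟩
  by_cases hd : x < t
  · have hL1 : 1 ≤ L := by
      rcases hz with h | h
      · exact h
      · have := h t htmem; have := h x hxmem; omega
    have hL0 : (0 : Int) < L := by omega
    set q := -(PySem.Int.floordiv (-(t - x)) L) with hqdef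
    have hbr : (q - 1) * L < t - x ∧ t - x ≤ q * L :=
      (PySem.Int.neg_floordiv_neg_eq_iff_of_pos hL0).mp rfl
    have hq1 : 1 ≤ q := by nlinarith [hbr.2]
    have hqd : q ≤ t - x := by nlinarith [hbr.1]
    have hfuel : q ≤ ((t - x).toNat : Int) := by omega
    have hwhile := whileMax_char q (t - x).toNat t x L Li i ys hL1 (hub t htmem) hd hq1
      hbr.1 hbr.2 hfuel
    have hA : fooMaxStep (xs, L, Li, ys) i =
        (PySem.List.pySetD xs i (x + q * L), (if x + q * L > L then x + q * L else L),
         (if x + q * L > L then i else Li), ys ++ List.replicate q.toNat (Li, i)) := by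
      simp only [fooMaxStep, ← ht, ← hx, hwhile]
    have hB : fooAltMaxStep (xs, L, Li, ys) i =
        (PySem.List.pySetD xs i (x + q * L), (if x + q * L > L then x + q * L else L),
         (if x + q * L > L then i else Li), ys ++ List.replicate q.toNat (Li, i)) := by
      have hkq : (if t - x ≤ L then (1 : Int) else if t - x ≤ 2 * L then 2
          else -(PySem.Int.floordiv (-(t - x)) L)) = q := by
        split_ifs with hk1 hk2
        · have hle : q ≤ 1 := by nlinarith [hbr.1]
          omega
        · have hle : q ≤ 2 := by nlinarith [hbr.1]
          have hge : 2 ≤ q := by nlinarith [hbr.2]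
          omega
        · rfl
      simp only [fooAltMaxStep, ← ht, ← hx]
      rw [if_pos (show t - x > 0 by omega)]
      rw [hkq]
      rw [PySem.List.pyRepeat_singleton]
      by_cases hXL : x + q * L > L
      · rw [if_pos hXL, if_pos hXL, if_pos hXL]
      · rw [if_neg hXL, if_neg hXL, if_neg hXL]
    refine ⟨hB.trans hA.symm, ?_, ?_, ?_⟩
    · rw [hA]
      simp only [pySetD_eq_set xs i _ (by omega) h2, List.length_set]
    · rw [hA]
      intro v hv
      simp only [pySetD_eq_set xs i _ (by omega) h2] at hv
      rcases List.mem_or_eq_of_mem_set hv with h | h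
      · have := hub v h
        by_cases hXL : x + q * L > L <;> simp [hXL] <;> omega
      · subst h
        by_cases hXL : x + q * L > L <;> simp [hXL] <;> omega
    · left
      rw [hA]
      by_cases hXL : x + q * L > L <;> simp [hXL] <;> omega
  · have hA : fooMaxStep (xs, L, Li, ys) i = (xs, L, Li, ys) := by
      simp only [fooMaxStep, ← ht, ← hx]
      rw [whileMax_stop _ _ _ _ _ _ _ (by omega)]
      have : PySem.List.pySetD xs i x = xs := by
        rw [hx, PySem.List.pyGetD_eq_getElem xs 0 (by omega) h2,
          pySetD_eq_set xs i _ (by omega) h2, List.set_getElem_self]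
      rw [this]
    have hB : fooAltMaxStep (xs, L, Li, ys) i = (xs, L, Li, ys) := by
      simp only [fooAltMaxStep, ← ht, ← hx]
      rw [if_neg (show ¬ t - x > 0 by omega)]
    rw [hA, hB]
    exact ⟨rfl, rfl, hub, hz⟩

theorem minStep_both (xs : List Int) (m mi : Int) (ys : List (Int × Int)) (i : Int)
    (h1 : 0 ≤ i) (h2 : i + 1 < (xs.length : Int))
    (hlb : ∀ v ∈ xs, m ≤ v) (hm : m ≤ -1) :
    fooAltMinStep (xs, m, mi, ys) i = fooMinStep (xs, m, mi, ys) i ∧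
    ((fooMinStep (xs, m, mi, ys) i).1.length = xs.length ∧
     (∀ v ∈ (fooMinStep (xs, m, mi, ys) i).1, (fooMinStep (xs, m, mi, ys) i).2.1 ≤ v) ∧
     (fooMinStep (xs, m, mi, ys) i).2.1 ≤ -1) := by
  have hlen0 : (0 : Int) ≤ xs.length := by positivity
  set t := PySem.List.pyGetD xs (i + 1) 0 with ht
  set x := PySem.List.pyGetD xs i 0 with hx
  have htmem : t ∈ xs := PySem.List.pyGetD_mem xs 0 ⟨by omega, by omega⟩
  have hxmem : x ∈ xs := PySem.List.pyGetD_mem xs 0 ⟨by omega, by omega⟩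
  by_cases hd : t < x
  · have hm0 : (0 : Int) < -m := by omega
    set q := -(PySem.Int.floordiv (x - t) m) with hqdef
    have hqdef' : q = -(PySem.Int.floordiv (-(x - t)) (-m)) := by
      rw [PySem.Int.floordiv_neg_neg]
    have hbr : (q - 1) * (-m) < x - t ∧ x - t ≤ q * (-m) :=
      (PySem.Int.neg_floordiv_neg_eq_iff_of_pos hm0).mp hqdef'.symm
    have hq1 : 1 ≤ q := by nlinarith [hbr.2]
    have hqd : q ≤ x - t := by nlinarith [hbr.1]
    have hfuel : q ≤ ((x - t).toNat : Int) := by omega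
    have hwhile := whileMin_char q (x - t).toNat t x m mi i ys hm (hlb t htmem) hd hq1
      hbr.1 hbr.2 hfuel
    have hA : fooMinStep (xs, m, mi, ys) i =
        (PySem.List.pySetD xs i (x + q * m), (if x + q * m < m then x + q * m else m),
         (if x + q * m < m then i else mi), ys ++ List.replicate q.toNat (mi, i)) := by
      simp only [fooMinStep, ← ht, ← hx, hwhile]
    have hB : fooAltMinStep (xs, m, mi, ys) i =
        (PySem.List.pySetD xs i (x + q * m), (if x + q * m < m then x + q * m else m),
         (if x + q * m < m then i else mi), ys ++ List.replicate q.toNat (mi, i)) := by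
      have hkq : (if x - t ≤ -m then (1 : Int) else if x - t ≤ -2 * m then 2
          else -(PySem.Int.floordiv (x - t) m)) = q := by
        split_ifs with hk1 hk2
        · have hle : q ≤ 1 := by nlinarith [hbr.1]
          omega
        · have hle : q ≤ 2 := by nlinarith [hbr.1]
          have hge : 2 ≤ q := by nlinarith [hbr.2]
          omega
        · rfl
      simp only [fooAltMinStep, ← ht, ← hx]
      rw [if_pos (show x - t > 0 by omega)]
      rw [hkq]
      rw [PySem.List.pyRepeat_singleton]
      by_cases hXm : x + q * m < m
      · rw [if_pos hXm, if_pos hXm, if_pos hXm]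
      · rw [if_neg hXm, if_neg hXm, if_neg hXm]
    refine ⟨hB.trans hA.symm, ?_, ?_, ?_⟩
    · rw [hA]
      simp only [pySetD_eq_set xs i _ (by omega) (by omega), List.length_set]
    · rw [hA]
      intro v hv
      simp only [pySetD_eq_set xs i _ (by omega) (by omega)] at hv
      rcases List.mem_or_eq_of_mem_set hv with h | h
      · have := hlb v h
        by_cases hXm : x + q * m < m <;> simp [hXm] <;> omega
      · subst h
        by_cases hXm : x + q * m < m <;> simp [hXm] <;> omega
    · rw [hA]
      by_cases hXm : x + q * m < m <;> simp [hXm] <;> omega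
  · have hA : fooMinStep (xs, m, mi, ys) i = (xs, m, mi, ys) := by
      simp only [fooMinStep, ← ht, ← hx]
      rw [whileMin_stop _ _ _ _ _ _ _ (by omega)]
      have : PySem.List.pySetD xs i x = xs := by
        rw [hx, PySem.List.pyGetD_eq_getElem xs 0 (by omega) (by omega),
          pySetD_eq_set xs i _ (by omega) (by omega), List.set_getElem_self]
      rw [this]
    have hB : fooAltMinStep (xs, m, mi, ys) i = (xs, m, mi, ys) := by
      simp only [fooAltMinStep, ← ht, ← hx]
      rw [if_neg (show ¬ x - t > 0 by omega)]
    rw [hA, hB]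
    exact ⟨rfl, rfl, hlb, hm⟩

theorem maxFold_eq (is : List Int) : ∀ (xs : List Int) (L Li : Int) (ys : List (Int × Int)),
    (∀ i ∈ is, 1 ≤ i ∧ i < (xs.length : Int)) → (∀ v ∈ xs, v ≤ L) →
    (1 ≤ L ∨ ∀ v ∈ xs, v = 0) →
    is.foldl fooMaxStep (xs, L, Li, ys) = is.foldl fooAltMaxStep (xs, L, Li, ys) := by
  induction is with
  | nil => intro xs L Li ys _ _ _; rfl
  | cons i rest ih =>
    intro xs L Li ys hbd hub hz
    obtain ⟨heq, hlen, hub', hz'⟩ :=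
      maxStep_both xs L Li ys i (hbd i (by simp)).1 (hbd i (by simp)).2 hub hz
    simp only [List.foldl_cons, heq]
    rcases hs : fooMaxStep (xs, L, Li, ys) i with ⟨xs', L', Li', ys'⟩
    rw [hs] at hlen hub' hz'
    exact ih xs' L' Li' ys'
      (fun j hj => ⟨(hbd j (by simp [hj])).1, by
        have := (hbd j (by simp [hj])).2
        simp only [hlen]; omega⟩) hub' hz'

theorem minFold_eq (is : List Int) : ∀ (xs : List Int) (m mi : Int) (ys : List (Int × Int)),
    (∀ i ∈ is, 0 ≤ i ∧ i + 1 < (xs.length : Int)) → (∀ v ∈ xs, m ≤ v) → m ≤ -1 →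
    is.foldl fooMinStep (xs, m, mi, ys) = is.foldl fooAltMinStep (xs, m, mi, ys) := by
  induction is with
  | nil => intro xs m mi ys _ _ _; rfl
  | cons i rest ih =>
    intro xs m mi ys hbd hlb hm
    obtain ⟨heq, hlen, hlb', hm'⟩ :=
      minStep_both xs m mi ys i (hbd i (by simp)).1 (hbd i (by simp)).2 hlb hm
    simp only [List.foldl_cons, heq]
    rcases hs : fooMinStep (xs, m, mi, ys) i with ⟨xs', m', mi', ys'⟩
    rw [hs] at hlen hlb' hm'
    exact ih xs' m' mi' ys'
      (fun j hj => ⟨(hbd j (by simp [hj])).1, by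
        have := (hbd j (by simp [hj])).2
        simp only [hlen]; omega⟩) hlb' hm'

-- ===== VERDICT (by name: the statement is the Claim_ definition above) =====
theorem foo_spec : Claim_equal_foo := by
  intro xs n _ hPre
  unfold Spec_foo
  cases xs with
  | nil =>
    have hn : n ≤ 1 := by
      rcases hPre with h | h
      · simp at h; omega
      · exact h
    simp only [foo, foo_alt, if_pos rfl]
    rw [PySem.List.pyRange_one_eq_nil (by omega)]
    simp [PySem.List.enumerate]
  | cons a t =>
    have hne : a :: t ≠ [] := by simp
    set M := t.foldl max a with hMdef
    set m := t.foldl min a with hmdef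
    have hMx : PySem.List.max? (a :: t) (fun y => y) = some M := PySem.List.max?_id_cons a t
    have hmx : PySem.List.min? (a :: t) (fun y => y) = some m := PySem.List.min?_id_cons a t
    have hub : ∀ v ∈ a :: t, v ≤ M := by
      intro v hv; exact PySem.List.max?_isMax hMx v hv
    have hlb : ∀ v ∈ a :: t, m ≤ v := by
      intro v hv; exact PySem.List.min?_isMin hmx v hv
    have hmM : m ≤ M := le_trans (hlb a (by simp)) (hub a (by simp))
    -- A's scan values
    have hscan := scan_eq_amax_amin (a :: t) 0 (-1000000) (-1) 1000000 (-1)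
    have hLA : (amax (-1000000) (-1) 0 (a :: t)).1 = max (-1000000) M := by
      rw [amax_fst, List.foldl_cons, hMdef]
      exact List.foldl_assoc
    have hmA : (amin 1000000 (-1) 0 (a :: t)).1 = min 1000000 m := by
      rw [amin_fst, List.foldl_cons, hmdef]
      exact List.foldl_assoc
    simp only [foo, foo_alt, if_neg hne, hscan, hLA, hmA]
    by_cases hcond : m < 0 ∧ -m > M
    · -- min-dominant branch in both programs
      have hm0 : m < 0 := hcond.1
      have hminA : min 1000000 m = m := by omega
      have habs : |min 1000000 m| = -m := by rw [hminA]; exact abs_of_neg hm0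
      have hcondA : min 1000000 m < 0 ∧ |min 1000000 m| > max (-1000000) M := by
        constructor
        · omega
        · rw [habs]
          have : -m > M := hcond.2
          omega
      rw [if_pos hcondA]
      have hgetD : (PySem.List.max? (a :: t) (fun y => y)).getD 0 = M := by rw [hMx]; rfl
      have hgetDm : (PySem.List.min? (a :: t) (fun y => y)).getD 0 = m := by rw [hmx]; rfl
      simp only [hgetD, hgetDm]
      rw [if_pos (show m < 0 ∧ -m > M from hcond)]
      have hmiA : (amin 1000000 (-1) 0 (a :: t)).2
          = ((PySem.List.index? (a :: t) m).getD 0 : Nat) := by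
        rw [amin_snd (a :: t) m hmx 1000000 (-1) 0 (by omega)]
        omega
      rw [hminA, hmiA]
      rcases hPre with hlen | hn1
      · exact congrArg (fun z => z.2.2.2) <| minFold_eq (PySem.List.pyRange (n - 2) (-1) (-1)) (a :: t) m
          (((PySem.List.index? (a :: t) m).getD 0 : Nat) : Int) []
          (fun i hi => by
            rw [PySem.List.mem_pyRange_neg_one] at hi
            constructor
            · omega
            · omega)
          hlb (by omega)
      · rw [PySem.List.pyRange_neg_one_eq_nil (by omega)]
        rfl
    · -- max-dominant branch in both programs
      have hM1e6 : -1000000 < M := by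
        by_contra h
        exact hcond ⟨by omega, by omega⟩
      have hcondA : ¬ (min 1000000 m < 0 ∧ |min 1000000 m| > max (-1000000) M) := by
        intro ⟨h1, h2⟩
        have hm0 : m < 0 := by omega
        have hminA : min 1000000 m = m := by omega
        rw [hminA, abs_of_neg hm0] at h2
        exact hcond ⟨hm0, by omega⟩
      rw [if_neg hcondA]
      have hgetD : (PySem.List.max? (a :: t) (fun y => y)).getD 0 = M := by rw [hMx]; rfl
      have hgetDm : (PySem.List.min? (a :: t) (fun y => y)).getD 0 = m := by rw [hmx]; rfl
      simp only [hgetD, hgetDm]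
      rw [if_neg (show ¬ (m < 0 ∧ -m > M) from hcond)]
      have hLAv : max (-1000000) M = M := by omega
      have hLiA : (amax (-1000000) (-1) 0 (a :: t)).2
          = ((PySem.List.index? (a :: t) M).getD 0 : Nat) := by
        rw [amax_snd (a :: t) M hMx (-1000000) (-1) 0 hM1e6]
        omega
      rw [hLAv, hLiA]
      have hz : 1 ≤ M ∨ ∀ v ∈ a :: t, v = 0 := by
        by_cases h1M : 1 ≤ M
        · left; exact h1M
        · right
          have hm0 : 0 ≤ m := by
            by_contra h
            exact hcond ⟨by omega, by omega⟩
          intro v hv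
          have := hub v hv
          have := hlb v hv
          omega
      rcases hPre with hlen | hn1
      · exact congrArg (fun z => z.2.2.2) <| maxFold_eq (PySem.List.pyRange 1 n 1) (a :: t) M
          (((PySem.List.index? (a :: t) M).getD 0 : Nat) : Int) []
          (fun i hi => by
            rw [PySem.List.mem_pyRange_one] at hi
            constructor
            · omega
            · omega)
          hub hz
      · rw [PySem.List.pyRange_one_eq_nil (by omega)]
        rfl
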